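-- pv_equiv track=rewrite | github.com/joelbolduc/Bible_plan_generator | Bible_plan_generator.py | complete_tokens
-- ===== SOURCE A (Python) =====
-- def get_book(token):
--     """given a token (as returned by above funcion), this returns the book that it is in or '' if there is none
--     (as in Ps 17,19, where 19 fits in a seperate token"""
--     book=''
--     for i in range(len(token)):
--         if(token[i].isalpha() or (token[i].isdigit()) and token[min(len(token)-1,i+1)].isalpha()):
--             book=book+token[i]
--         else:
--             return book
--     return book
--
-- def complete_tokens(tokens):
--     """Completes the bookless tokens in a list of tokens extracted from a line in get_tokens"""
--     tk=list(tokens)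
--     book=get_book(tk[0])
--     for i in range(1,len(tk)):
--         if(get_book(tk[i])==''):
--             tk[i]=book+tk[i]
--         else:
--             book=get_book(tk[i])
--     return tk
-- ===== SOURCE B (Python) =====
-- def get_book(token):
--     n = len(token)
--     k = 0
--     while k < n and (token[k].isalpha() or (token[k].isdigit() and token[min(n - 1, k + 1)].isalpha())):
--         k += 1
--     return token[:k]
--
-- def complete_tokens(tokens):
--     tk = list(tokens)
--     books = [get_book(t) for t in tk]
--     ff = books[:1]
--     for b in books[1:]:
--         ff.append(b if b else ff[-1])
--     return tk[:1] + [b + t if gb == '' else t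
--                      for t, gb, b in zip(tk[1:], books[1:], ff[1:])]
-- ===== Notes on version B (the rewrite author's own statement) =====
-- stated objective: alternative
-- what changed: replaces the single stateful carry loop with a table-building decomposition: compute a per-token book list, forward-fill it by a scan, then build the output by zipping tokens with the filled table; get_book becomes an index-advance plus one slice instead of character-by-character accumulation
import Mathlib
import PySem

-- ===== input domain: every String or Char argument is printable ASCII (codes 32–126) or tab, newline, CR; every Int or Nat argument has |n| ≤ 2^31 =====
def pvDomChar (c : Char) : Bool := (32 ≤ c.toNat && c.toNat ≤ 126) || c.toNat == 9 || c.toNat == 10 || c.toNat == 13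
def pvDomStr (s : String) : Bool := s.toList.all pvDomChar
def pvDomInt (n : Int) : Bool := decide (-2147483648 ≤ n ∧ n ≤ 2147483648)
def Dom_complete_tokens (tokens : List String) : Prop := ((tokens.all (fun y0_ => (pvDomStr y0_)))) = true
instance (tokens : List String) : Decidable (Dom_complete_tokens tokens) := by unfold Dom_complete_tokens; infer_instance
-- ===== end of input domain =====

-- B changes the decomposition (per-token book table + forward-fill scan + zip) — alternative, not faster.

-- ===== PORT A =====
-- the loop condition of get_book at index i; exact: Python's 1-char isalpha/isdigit via PySem.Chars
-- (both loops only test i < len(token), so the getD default is never read)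
def pvCondA (cs : List Char) (i : Nat) : Bool :=
  PySem.Chars.isalpha (cs.getD i ' ') ||
    (PySem.Chars.isdigit (cs.getD i ' ') &&
      PySem.Chars.isalpha (cs.getD (min (cs.length - 1) (i + 1)) ' '))

-- A's get_book loop: for i in range(len(token)) with early return, accumulating book;
-- the remaining suffix of the string drives the recursion (i < len ↔ suffix nonempty)
def pvGetBookGoA (cs : List Char) : List Char → Nat → List Char → List Char
  | [], _, book => book
  | c :: rest, i, book =>
    if pvCondA cs i then pvGetBookGoA cs rest (i + 1) (book ++ [c]) else book

def pvGetBookA (token : String) : String :=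
  String.mk (pvGetBookGoA token.toList token.toList 0 [])

-- A's for i in range(1, len(tk)) loop carrying the current book
def pvCompleteGoA (book : String) (rest : List String) : List String :=
  match rest with
  | [] => []
  | t :: ts =>
    if pvGetBookA t = "" then (book ++ t) :: pvCompleteGoA book ts
    else t :: pvCompleteGoA (pvGetBookA t) ts

def complete_tokens (tokens : List String) : List String :=
  match tokens with
  | [] => []  -- Python A raises IndexError here (tk[0]); excluded by Pre_
  | t :: ts => t :: pvCompleteGoA (pvGetBookA t) ts

-- ===== PORT B =====
-- B's get_book: advance an index k while the condition holds (while k < n, the suffix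
-- drives the recursion), then slice token[:k]
def pvGetBookKB (cs : List Char) : List Char → Nat → Nat
  | [], k => k
  | _ :: rest, k => if pvCondA cs k then pvGetBookKB cs rest (k + 1) else k

def pvGetBookB (token : String) : String :=
  String.mk (token.toList.take (pvGetBookKB token.toList token.toList 0))

-- B's forward-fill loop: ff.append(b if b else ff[-1]) carrying the last element
def pvFFGoB (prev : String) (bs : List String) : List String :=
  match bs with
  | [] => []
  | b :: rest =>
    let v := if b ≠ "" then b else prev
    v :: pvFFGoB v rest

def pvFFB (books : List String) : List String :=
  match books with
  | [] => []
  | b :: bs => b :: pvFFGoB b bs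

def complete_tokens_alt (tokens : List String) : List String :=
  let tk := tokens
  let books := tk.map pvGetBookB
  let ff := pvFFB books
  tk.take 1 ++
    (((tk.drop 1).zip ((books.drop 1).zip (ff.drop 1))).map
      (fun p => if p.2.1 = "" then p.2.2 ++ p.1 else p.1))

-- ===== PRECONDITION & SPEC =====
-- Pre_ excludes only the empty list, on which Python A raises IndexError (tk[0]).
def Pre_complete_tokens (tokens : List String) : Prop := tokens ≠ []
instance (tokens : List String) : Decidable (Pre_complete_tokens tokens) := by
  unfold Pre_complete_tokens; infer_instance

def pvWitness_complete_tokens : List String := ["Gen 1", "2"]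

def Spec_complete_tokens (tokens : List String) (out : List String) : Prop :=
  out = complete_tokens_alt tokens
instance (tokens : List String) (out : List String) : Decidable (Spec_complete_tokens tokens out) := by
  unfold Spec_complete_tokens; infer_instance

-- ===== CLAIM (what is proved, stated in full; the proofs are below) =====
def Claim_equal_complete_tokens : Prop := ∀ (tokens : List String),
  Dom_complete_tokens tokens → Pre_complete_tokens tokens →
    Spec_complete_tokens tokens (complete_tokens tokens)

-- ===== LEMMAS AND PROOFS =====
-- B's index loop never moves backwards.
theorem getBookKB_ge (cs rest : List Char) (k : Nat) : k ≤ pvGetBookKB cs rest k := by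
  induction rest generalizing k with
  | nil => simp [pvGetBookKB]
  | cons c rs ih =>
    rw [pvGetBookKB]
    by_cases hc : pvCondA cs k
    · have := ih (k + 1); simp only [hc, if_true]; omega
    · simp [hc]

-- A's accumulator loop equals B's index-then-slice form, over the same driving suffix.
theorem getBookGoA_eq (cs : List Char) (rest : List Char) (i : Nat) (book : List Char) :
    pvGetBookGoA cs rest i book = book ++ rest.take (pvGetBookKB cs rest i - i) := by
  induction rest generalizing i book with
  | nil => simp [pvGetBookGoA, pvGetBookKB]
  | cons c rs ih =>
    rw [pvGetBookGoA, pvGetBookKB]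
    by_cases hc : pvCondA cs i
    · simp only [hc, if_true]
      rw [ih (i + 1) (book ++ [c])]
      have hk : i + 1 ≤ pvGetBookKB cs rs (i + 1) := getBookKB_ge cs rs (i + 1)
      have h1 : pvGetBookKB cs rs (i + 1) - i = (pvGetBookKB cs rs (i + 1) - (i + 1)) + 1 := by
        omega
      rw [h1, List.take_succ_cons, List.append_assoc, List.singleton_append]
    · simp [hc]

theorem getBook_eq (t : String) : pvGetBookA t = pvGetBookB t := by
  unfold pvGetBookA pvGetBookB
  rw [getBookGoA_eq]
  simp

-- A's stateful loop equals B's zip of the book table with its forward fill.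
theorem completeGoA_eq (book : String) (ts : List String) :
    pvCompleteGoA book ts =
      ((ts.zip ((ts.map pvGetBookB).zip (pvFFGoB book (ts.map pvGetBookB)))).map
        (fun p => if p.2.1 = "" then p.2.2 ++ p.1 else p.1)) := by
  induction ts generalizing book with
  | nil => simp [pvCompleteGoA]
  | cons t rest ih =>
    simp only [pvCompleteGoA, List.map_cons, pvFFGoB, List.zip_cons_cons, List.map_cons]
    rw [getBook_eq]
    by_cases hb : pvGetBookB t = ""
    · simp [hb, ih]
    · simp [hb, ih]

theorem complete_eq (tokens : List String) (hne : tokens ≠ []) :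
    complete_tokens tokens = complete_tokens_alt tokens := by
  match tokens with
  | [] => exact absurd rfl hne
  | t :: ts =>
    simp only [complete_tokens, complete_tokens_alt, List.map_cons, pvFFB,
      List.take_succ_cons, List.take_zero, List.drop_succ_cons, List.drop_zero,
      List.singleton_append, List.cons.injEq]
    exact ⟨trivial, by rw [getBook_eq]; exact completeGoA_eq _ ts⟩

-- ===== VERDICT (by name: the statement is the Claim_ definition above) =====
theorem complete_tokens_spec : Claim_equal_complete_tokens := by
  intro tokens _ hpre
  exact complete_eq tokens hpre
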